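-- pv_equiv track=rewrite | github.com/joshoua-bigler/automated-pdm | agent_rul/src/agent_rul/data/data_schema.py | _detect_time_col
-- ===== SOURCE A (Python) =====
-- def _detect_time_col(cols: list[str]) -> str | None:
--   candidates = ('cycle', 'time', 'timestamp', 't', 'sample', 'index')
--   for c in candidates:
--     if c in cols:
--       return c
--   for c in ('run', 'ticks', 'frame'):
--     if c in cols:
--       return c
--   return None
-- ===== SOURCE B (Python) =====
-- _RANK = {'cycle': 0, 'time': 1, 'timestamp': 2, 't': 3, 'sample': 4,
--          'index': 5, 'run': 6, 'ticks': 7, 'frame': 8}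
--
-- def _detect_time_col(cols: list[str]) -> str | None:
--   best = None
--   best_rank = 9
--   for c in cols:
--     r = _RANK.get(c)
--     if r is not None and r < best_rank:
--       best = c
--       best_rank = r
--   return best
-- ===== Notes on version B (the rewrite author's own statement) =====
-- stated objective: alternative
-- what changed: Replaces nine repeated membership scans over cols (one per candidate) by a fixed rank dictionary and a single pass over cols keeping the column of minimal rank.
import Mathlib
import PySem

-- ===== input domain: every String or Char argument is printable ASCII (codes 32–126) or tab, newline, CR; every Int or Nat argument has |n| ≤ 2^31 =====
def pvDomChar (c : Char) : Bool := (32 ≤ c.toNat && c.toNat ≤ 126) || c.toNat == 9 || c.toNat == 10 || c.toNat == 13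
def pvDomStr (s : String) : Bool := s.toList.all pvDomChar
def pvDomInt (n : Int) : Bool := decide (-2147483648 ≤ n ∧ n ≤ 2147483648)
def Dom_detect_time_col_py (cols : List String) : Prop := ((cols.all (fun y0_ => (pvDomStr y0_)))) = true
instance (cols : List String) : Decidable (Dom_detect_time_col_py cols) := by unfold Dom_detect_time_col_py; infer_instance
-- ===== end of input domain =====

-- B replaces A's nine membership scans over cols (one per candidate) by a rank dictionary and one pass over cols keeping the minimal-rank column (alternative decomposition, same result).

-- ===== PORT A =====
def detect_time_col_py (cols : List String) : Option String :=
  match List.find? (fun c => cols.contains c) ["cycle", "time", "timestamp", "t", "sample", "index"] with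
  | some c => some c
  | none =>
    match List.find? (fun c => cols.contains c) ["run", "ticks", "frame"] with
    | some c => some c
    | none => none

-- ===== PORT B =====
def pvRankDict : PySem.Dict String Nat :=
  PySem.Dict.ofList [("cycle", 0), ("time", 1), ("timestamp", 2), ("t", 3), ("sample", 4),
                     ("index", 5), ("run", 6), ("ticks", 7), ("frame", 8)]

def detect_time_col_py_alt (cols : List String) : Option String :=
  (cols.foldl (fun s c =>
      match PySem.Dict.get? pvRankDict c with
      | some r => if r < s.2 then (some c, r) else s
      | none => s)
    ((none : Option String), 9)).1

-- ===== PRECONDITION & SPEC =====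
def Spec_detect_time_col_py (cols : List String) (out : Option String) : Prop := out = detect_time_col_py_alt cols
instance (cols : List String) (out : Option String) : Decidable (Spec_detect_time_col_py cols out) := by unfold Spec_detect_time_col_py; infer_instance

-- ===== CLAIM (what is proved, stated in full; the proofs are below) =====
def Claim_equal_detect_time_col_py : Prop := ∀ (cols : List String), Dom_detect_time_col_py cols → Spec_detect_time_col_py cols (detect_time_col_py cols)

-- ===== LEMMAS AND PROOFS =====

/-- The candidate list in priority order. -/
def pvCands : List String :=
  ["cycle", "time", "timestamp", "t", "sample", "index", "run", "ticks", "frame"]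

/-- Rank of a column, 9 if not a candidate. -/
def pvRankD (c : String) : Nat := (PySem.Dict.get? pvRankDict c).getD 9

/-- The state of B's fold is determined by the running minimum rank. -/
def pvStateOf (r : Nat) : Option String × Nat :=
  (if r = 9 then none else some (pvCands.getD r ""), r)

/-- Minimum rank of the elements of `cols`, starting from `r`. -/
def pvMinR (cols : List String) (r : Nat) : Nat :=
  cols.foldl (fun m c => min m (pvRankD c)) r

lemma pvRank_some {c : String} {k : Nat} (h : PySem.Dict.get? pvRankDict c = some k) :
    k < 9 ∧ c = pvCands.getD k "" := by
  simp only [pvRankDict, PySem.Dict.ofList, PySem.Dict.update, List.foldl_cons, List.foldl_nil,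
    PySem.Dict.get?_insert] at h
  split_ifs at h with h1 h2 h3 h4 h5 h6 h7 h8 h9
  · injection h with h'; subst h'; exact ⟨by norm_num, h1⟩
  · injection h with h'; subst h'; exact ⟨by norm_num, h2⟩
  · injection h with h'; subst h'; exact ⟨by norm_num, h3⟩
  · injection h with h'; subst h'; exact ⟨by norm_num, h4⟩
  · injection h with h'; subst h'; exact ⟨by norm_num, h5⟩
  · injection h with h'; subst h'; exact ⟨by norm_num, h6⟩
  · injection h with h'; subst h'; exact ⟨by norm_num, h7⟩
  · injection h with h'; subst h'; exact ⟨by norm_num, h8⟩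
  · injection h with h'; subst h'; exact ⟨by norm_num, h9⟩
  · exact absurd h (by simp)

lemma pvRank_none {c : String} (h : PySem.Dict.get? pvRankDict c = none) :
    pvRankD c = 9 := by simp [pvRankD, h]

lemma pvRank_cand : ∀ j : Nat, j < 9 → pvRankD (pvCands.getD j "") = j := by
  intro j hj
  interval_cases j <;>
    simp [pvRankD, pvCands, pvRankDict, PySem.Dict.ofList, PySem.Dict.update, PySem.Dict.get?_insert]

lemma pvMem_cands {x : String} (hx : x ∈ pvCands) : pvRankD x < 9 := by
  simp only [pvCands, List.mem_cons, List.not_mem_nil, or_false] at hx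
  rcases hx with rfl|rfl|rfl|rfl|rfl|rfl|rfl|rfl|rfl
  · exact lt_of_eq_of_lt (pvRank_cand 0 (by norm_num)) (by norm_num)
  · exact lt_of_eq_of_lt (pvRank_cand 1 (by norm_num)) (by norm_num)
  · exact lt_of_eq_of_lt (pvRank_cand 2 (by norm_num)) (by norm_num)
  · exact lt_of_eq_of_lt (pvRank_cand 3 (by norm_num)) (by norm_num)
  · exact lt_of_eq_of_lt (pvRank_cand 4 (by norm_num)) (by norm_num)
  · exact lt_of_eq_of_lt (pvRank_cand 5 (by norm_num)) (by norm_num)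
  · exact lt_of_eq_of_lt (pvRank_cand 6 (by norm_num)) (by norm_num)
  · exact lt_of_eq_of_lt (pvRank_cand 7 (by norm_num)) (by norm_num)
  · exact lt_of_eq_of_lt (pvRank_cand 8 (by norm_num)) (by norm_num)

lemma pvStep (r : Nat) (hr : r ≤ 9) (c : String) :
    (match PySem.Dict.get? pvRankDict c with
      | some k => if k < (pvStateOf r).2 then (some c, k) else pvStateOf r
      | none => pvStateOf r) = pvStateOf (min r (pvRankD c)) := by
  cases h : PySem.Dict.get? pvRankDict c with
  | none =>
      have hd : pvRankD c = 9 := pvRank_none h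
      simp [hd, Nat.min_eq_left hr]
  | some k =>
      obtain ⟨hk9, hc⟩ := pvRank_some h
      have hd : pvRankD c = k := by simp [pvRankD, h]
      rw [hd]
      by_cases hkr : k < r
      · have hmin : min r k = k := by omega
        have hk9' : ¬ (k = 9) := by omega
        simp only [pvStateOf, hmin, if_neg hk9']
        simp [hkr, hc]
      · have hmin : min r k = r := by omega
        simp [pvStateOf, hmin, hkr]

lemma pvFoldB (cols : List String) : ∀ r : Nat, r ≤ 9 →
    cols.foldl (fun s c =>
      match PySem.Dict.get? pvRankDict c with
      | some k => if k < s.2 then (some c, k) else s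
      | none => s) (pvStateOf r) = pvStateOf (pvMinR cols r) := by
  induction cols with
  | nil => intro r _; simp [pvMinR]
  | cons c cs ih =>
      intro r hr
      have hstep := pvStep r hr c
      have hle : min r (pvRankD c) ≤ 9 := le_trans (Nat.min_le_left _ _) hr
      simp only [List.foldl_cons]
      rw [hstep, ih _ hle]
      simp [pvMinR, List.foldl_cons]

lemma pvMinR_le (cols : List String) : ∀ r, pvMinR cols r ≤ r := by
  induction cols with
  | nil => intro r; simp [pvMinR]
  | cons c cs ih =>
      intro r
      have := ih (min r (pvRankD c))
      have h2 : min r (pvRankD c) ≤ r := Nat.min_le_left _ _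
      simp only [pvMinR, List.foldl_cons] at *
      omega

lemma pvMinR_lb (cols : List String) : ∀ r c, c ∈ cols → pvMinR cols r ≤ pvRankD c := by
  induction cols with
  | nil => intro r c hc; cases hc
  | cons x xs ih =>
      intro r c hc
      rcases List.mem_cons.mp hc with rfl | hmem
      · have := pvMinR_le xs (min r (pvRankD c))
        have h2 : min r (pvRankD c) ≤ pvRankD c := Nat.min_le_right _ _
        simp only [pvMinR, List.foldl_cons] at *
        omega
      · have := ih (min r (pvRankD x)) c hmem
        simp only [pvMinR, List.foldl_cons] at *
        omega

lemma pvMinR_ex (cols : List String) :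
    ∀ r, pvMinR cols r = r ∨ ∃ c ∈ cols, pvRankD c = pvMinR cols r := by
  induction cols with
  | nil => intro r; left; simp [pvMinR]
  | cons x xs ih =>
      intro r
      have hx : pvMinR (x :: xs) r = pvMinR xs (min r (pvRankD x)) := by
        simp [pvMinR, List.foldl_cons]
      rcases ih (min r (pvRankD x)) with h | ⟨c, hc, hrc⟩
      · by_cases hmin : min r (pvRankD x) = r
        · left; rw [hx, h, hmin]
        · right
          refine ⟨x, List.mem_cons_self .., ?_⟩
          rw [hx, h]
          omega
      · right; exact ⟨c, List.mem_cons_of_mem _ hc, by rw [hx]; exact hrc⟩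

lemma pvFind?_idx (p : String → Bool) : ∀ (l : List String) (k : Nat), k < l.length →
    (∀ j, j < k → p (l.getD j "") = false) → p (l.getD k "") = true →
    l.find? p = some (l.getD k "") := by
  intro l
  induction l with
  | nil => intro k hk; simp at hk
  | cons x xs ih =>
      intro k hk hlt hk'
      cases k with
      | zero => simp at hk' ⊢; simp [hk']
      | succ k =>
          have h0 : p x = false := by have := hlt 0 (Nat.succ_pos _); simpa using this
          have hx : xs.find? p = some (xs.getD k "") := by
            refine ih k (by simpa using hk) (fun j hj => ?_) (by simpa using hk')
            have := hlt (j + 1) (by omega)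
            simpa using this
          simp [List.find?, h0, hx]

lemma pvA_eq_find (cols : List String) :
    detect_time_col_py cols = List.find? (fun c => cols.contains c) pvCands := by
  unfold detect_time_col_py pvCands
  cases h : List.find? (fun c => cols.contains c)
      ["cycle", "time", "timestamp", "t", "sample", "index"] with
  | some c =>
      have hfull : List.find? (fun c => cols.contains c)
          (["cycle", "time", "timestamp", "t", "sample", "index"] ++ ["run", "ticks", "frame"])
          = some c := by
        rw [List.find?_append, h]; rfl
      simpa using hfull.symm
  | none =>
      have hfull : List.find? (fun c => cols.contains c)
          (["cycle", "time", "timestamp", "t", "sample", "index"] ++ ["run", "ticks", "frame"])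
          = List.find? (fun c => cols.contains c) ["run", "ticks", "frame"] := by
        rw [List.find?_append, h]; rfl
      rw [show (["cycle", "time", "timestamp", "t", "sample", "index"] ++
          ["run", "ticks", "frame"] : List String) =
          ["cycle", "time", "timestamp", "t", "sample", "index", "run", "ticks", "frame"] from rfl] at hfull
      rw [hfull]
      cases List.find? (fun c => cols.contains c) ["run", "ticks", "frame"] <;> rfl

-- ===== VERDICT (by name: the statement is the Claim_ definition above) =====
theorem detect_time_col_py_spec : Claim_equal_detect_time_col_py := by
  intro cols _
  unfold Spec_detect_time_col_py
  have hinit : ((none : Option String), 9) = pvStateOf 9 := by simp [pvStateOf]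
  have hB : detect_time_col_py_alt cols = (pvStateOf (pvMinR cols 9)).1 := by
    unfold detect_time_col_py_alt
    rw [hinit, pvFoldB cols 9 (le_refl 9)]
  set M := pvMinR cols 9 with hMdef
  have hM9 : M ≤ 9 := pvMinR_le cols 9
  rw [hB, pvA_eq_find]
  by_cases hM : M = 9
  · -- no candidate occurs in cols
    have hnone : ∀ x ∈ pvCands, ¬ (cols.contains x = true) := by
      intro x hx hcontra
      have hmem : x ∈ cols := by simpa using hcontra
      have hlb := pvMinR_lb cols 9 x hmem
      have hlt := pvMem_cands hx
      rw [← hMdef, hM] at hlb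
      omega
    rw [List.find?_eq_none.mpr (fun x hx => by simpa using hnone x hx)]
    simp [pvStateOf, hM]
  · -- the minimal-rank candidate is present, all lower ranks absent
    have hMlt : M < 9 := by omega
    rcases pvMinR_ex cols 9 with h | ⟨c, hc, hrc⟩
    · rw [← hMdef] at h; omega
    · rw [← hMdef] at hrc
      have hcM : c = pvCands.getD M "" := by
        cases hg : PySem.Dict.get? pvRankDict c with
        | none =>
            exfalso
            have h9 := pvRank_none hg
            omega
        | some k =>
            have hdk : pvRankD c = k := by simp [pvRankD, hg]
            have hk : k = M := by omega
            obtain ⟨_, hcc⟩ := pvRank_some hg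
            rw [hcc, hk]
      have hmemM : cols.contains (pvCands.getD M "") = true := by
        rw [← hcM]; simpa using hc
      have hlow : ∀ j, j < M → cols.contains (pvCands.getD j "") = false := by
        intro j hj
        by_contra hne
        have hmem : pvCands.getD j "" ∈ cols := by
          simp only [Bool.not_eq_false] at hne; simpa using hne
        have hlb := pvMinR_lb cols 9 _ hmem
        rw [← hMdef, pvRank_cand j (by omega)] at hlb
        omega
      rw [pvFind?_idx (fun c => cols.contains c) pvCands M (by simp [pvCands]; omega) hlow hmemM]
      simp [pvStateOf, hM]
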